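-- pv_equiv track=rewrite | github.com/valentino-saitz-optris/svgpathfix | fix_path.py | split_into_subpaths
-- ===== SOURCE A (Python) =====
-- def split_into_subpaths(cmds):
--     subpaths, current = [], []
--     for cmd, args in cmds:
--         if cmd in ('M', 'm') and current:
--             subpaths.append(current)
--             current = []
--         current.append((cmd, args))
--     if current:
--         subpaths.append(current)
--     return subpaths
-- ===== SOURCE B (Python) =====
-- def split_into_subpaths(cmds):
--     # Recursive slice-by-slice: take the head, collect following non-move
--     # commands as the body, recurse on the remainder.
--     if not cmds:
--         return []
--     head, rest = cmds[0], cmds[1:]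
--     body = []
--     for cmd_args in rest:
--         if cmd_args[0] in ('M', 'm'):
--             break
--         body.append(cmd_args)
--     return [[head] + body] + split_into_subpaths(rest[len(body):])
-- ===== Notes on version B (the rewrite author's own statement) =====
-- stated objective: alternative
-- what changed: Replaces the single accumulator loop (current list flushed at each move command) by a recursive decomposition that peels one complete subpath at a time: take the head command, collect the following non-move commands, and recurse on the remainder.
import Mathlib
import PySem

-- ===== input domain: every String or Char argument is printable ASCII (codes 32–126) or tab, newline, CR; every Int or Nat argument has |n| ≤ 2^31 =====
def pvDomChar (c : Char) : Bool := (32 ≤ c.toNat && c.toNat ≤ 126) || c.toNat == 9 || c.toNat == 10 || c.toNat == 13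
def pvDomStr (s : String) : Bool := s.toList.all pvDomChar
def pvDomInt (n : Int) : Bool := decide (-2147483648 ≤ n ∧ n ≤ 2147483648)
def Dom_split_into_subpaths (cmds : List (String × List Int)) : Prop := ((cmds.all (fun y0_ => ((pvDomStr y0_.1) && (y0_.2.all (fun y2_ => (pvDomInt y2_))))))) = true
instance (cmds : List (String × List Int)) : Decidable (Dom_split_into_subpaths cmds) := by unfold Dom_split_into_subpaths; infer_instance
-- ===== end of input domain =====

-- B peels one complete subpath per recursive call instead of A's accumulator loop; same cost (objective: alternative).

-- ===== PORT A =====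
-- the body of A's for-loop, one step over the state (subpaths, current)
def pvStepA (acc : List (List (String × List Int)) × List (String × List Int))
    (ca : String × List Int) : List (List (String × List Int)) × List (String × List Int) :=
  if (ca.1 == "M" || ca.1 == "m") && !acc.2.isEmpty then
    (acc.1 ++ [acc.2], [] ++ [ca])
  else
    (acc.1, acc.2 ++ [ca])

def split_into_subpaths (cmds : List (String × List Int)) : List (List (String × List Int)) :=
  let st := cmds.foldl pvStepA ([], [])
  if !st.2.isEmpty then st.1 ++ [st.2] else st.1

-- ===== PORT B =====
-- Source B's for/break loop collecting the body of the first subpath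
def pvBody (rest : List (String × List Int)) : List (String × List Int) :=
  match rest with
  | [] => []
  | ca :: xs => if ca.1 == "M" || ca.1 == "m" then [] else ca :: pvBody xs

def split_into_subpaths_alt (cmds : List (String × List Int)) : List (List (String × List Int)) :=
  match cmds with
  | [] => []
  | head :: rest =>
    let body := pvBody rest
    ([head] ++ body) :: split_into_subpaths_alt (rest.drop body.length)
termination_by cmds.length
decreasing_by
  simp only [List.length_cons, List.length_drop]
  omega

-- ===== PRECONDITION & SPEC =====
def Spec_split_into_subpaths (cmds : List (String × List Int)) (out : List (List (String × List Int))) : Prop := out = split_into_subpaths_alt cmds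
instance (cmds : List (String × List Int)) (out : List (List (String × List Int))) : Decidable (Spec_split_into_subpaths cmds out) := by unfold Spec_split_into_subpaths; infer_instance

-- ===== CLAIM (what is proved, stated in full; the proofs are below) =====
def Claim_equal_split_into_subpaths : Prop := ∀ (cmds : List (String × List Int)), Dom_split_into_subpaths cmds → Spec_split_into_subpaths cmds (split_into_subpaths cmds)

-- ===== LEMMAS AND PROOFS =====

theorem pvAlt_nil : split_into_subpaths_alt [] = [] := by
  rw [split_into_subpaths_alt]

theorem pvAlt_cons (head : String × List Int) (rest : List (String × List Int)) :
    split_into_subpaths_alt (head :: rest) =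
      ([head] ++ pvBody rest) :: split_into_subpaths_alt (rest.drop (pvBody rest).length) := by
  rw [split_into_subpaths_alt]

-- finalize step of A
def pvFin (st : List (List (String × List Int)) × List (String × List Int)) : List (List (String × List Int)) :=
  if !st.2.isEmpty then st.1 ++ [st.2] else st.1

theorem pvLoop (cmds : List (String × List Int)) :
    ∀ (subpaths : List (List (String × List Int))) (current : List (String × List Int)),
      current ≠ [] →
      pvFin (cmds.foldl pvStepA (subpaths, current)) =
      subpaths ++ (current ++ pvBody cmds) :: split_into_subpaths_alt (cmds.drop (pvBody cmds).length) := by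
  induction cmds with
  | nil =>
    intro subpaths current hc
    simp [pvFin, pvBody, hc, pvAlt_nil]
  | cons ca xs ih =>
    intro subpaths current hc
    have hne : current.isEmpty = false := by simpa using hc
    by_cases hm : (ca.1 == "M" || ca.1 == "m") = true
    · rw [List.foldl_cons,
        show pvStepA (subpaths, current) ca = (subpaths ++ [current], [] ++ [ca]) by
          simp [pvStepA, hm, hne],
        ih (subpaths ++ [current]) ([] ++ [ca]) (by simp)]
      rw [show pvBody (ca :: xs) = [] by simp [pvBody, hm]]
      simp [pvAlt_cons]
    · rw [List.foldl_cons,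
        show pvStepA (subpaths, current) ca = (subpaths, current ++ [ca]) by
          simp [pvStepA, hm],
        ih subpaths (current ++ [ca]) (by simp)]
      rw [show pvBody (ca :: xs) = ca :: pvBody xs by simp [pvBody, hm]]
      simp

-- ===== VERDICT (by name: the statement is the Claim_ definition above) =====
theorem split_into_subpaths_spec : Claim_equal_split_into_subpaths := by
  intro cmds _
  unfold Spec_split_into_subpaths split_into_subpaths
  cases cmds with
  | nil => simp [pvAlt_nil]
  | cons ca xs =>
    show pvFin (List.foldl pvStepA (pvStepA ([], []) ca) xs) = _
    rw [show pvStepA ([], []) ca = ([], [ca]) by simp [pvStepA]]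
    rw [pvLoop xs [] [ca] (by simp), pvAlt_cons]
    simp
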